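-- pv_equiv track=rewrite | github.com/gofarrrr/lolla2 | src/engine/engines/pyramid/multi_persona_formatter.py | _apply_analytical_quantitative_style
-- ===== SOURCE A (Python) =====
-- def _apply_analytical_quantitative_style(content: str) -> str:
--     """Apply analytical quantitative communication style for CFO"""
--     style_enhancements = {
--         "significant": "quantifiable and significant",
--         "improvement": "measurable improvement",
--         "benefits": "quantified financial benefits",
--         "impact": "measured financial impact",
--         "results": "quantitative results and metrics",
--     }
--
--     styled_content = content
--     for original, enhancement in style_enhancements.items():
--         styled_content = styled_content.replace(original, enhancement)
--
--     return styled_content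
-- ===== SOURCE B (Python) =====
-- import re
--
-- _REST = {
--     "improvement": "measurable improvement",
--     "benefits": "quantified financial benefits",
--     "impact": "measured financial impact",
--     "results": "quantitative results and metrics",
-- }
-- _REST_RE = re.compile("|".join(_REST))
--
--
-- def _apply_analytical_quantitative_style(content: str) -> str:
--     """Apply analytical quantitative communication style for CFO.
--
--     "significant" is substituted first (occurrences of "benefits"/"results"
--     can overlap it via their trailing 's'); the four remaining keywords are
--     mutually non-overlapping, so one regex pass handles them all at once.
--     """
--     styled = content.replace("significant", "quantifiable and significant")
--     return _REST_RE.sub(lambda m: _REST[m.group(0)], styled)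
-- ===== Notes on version B (the rewrite author's own statement) =====
-- stated objective: alternative
-- what changed: A runs five sequential full str.replace scans, one per keyword; B replaces only 'significant' first (the one keyword whose occurrences the trailing 's' of 'benefits'/'results' can overlap) and then substitutes the remaining four keywords in a single left-to-right alternation pass driven by a compiled regex and a lookup table.
import Mathlib
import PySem

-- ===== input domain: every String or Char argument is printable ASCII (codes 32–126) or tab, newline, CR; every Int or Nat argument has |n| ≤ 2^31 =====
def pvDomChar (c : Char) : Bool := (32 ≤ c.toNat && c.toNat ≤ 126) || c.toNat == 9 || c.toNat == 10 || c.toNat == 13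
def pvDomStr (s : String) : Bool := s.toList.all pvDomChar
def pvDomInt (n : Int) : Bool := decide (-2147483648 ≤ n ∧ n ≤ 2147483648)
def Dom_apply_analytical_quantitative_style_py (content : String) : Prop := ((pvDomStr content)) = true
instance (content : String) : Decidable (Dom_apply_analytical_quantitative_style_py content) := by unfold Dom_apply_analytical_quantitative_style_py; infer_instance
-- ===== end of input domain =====

-- B replaces A's five sequential str.replace passes by one replace of "significant" (the only
-- keyword other keywords can overlap) followed by a single alternation scan for the other four
-- keywords; objective: alternative single-pass structure (not measured faster).

-- ===== PORT A =====
-- the dict's items, in insertion order (the loop over style_enhancements.items())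
def pvStylePairs : List (String × String) :=
  [("significant", "quantifiable and significant"),
   ("improvement", "measurable improvement"),
   ("benefits", "quantified financial benefits"),
   ("impact", "measured financial impact"),
   ("results", "quantitative results and metrics")]

def apply_analytical_quantitative_style_py (content : String) : String :=
  pvStylePairs.foldl (fun styled kv => PySem.Str.replace styled kv.1 kv.2) content

-- ===== PORT B =====
-- hand port of the compiled regex pass `_REST_RE.sub(lambda m: _REST[m.group(0)], styled)`:
-- exact because the four alternatives are plain words, pairwise non-prefix, so re.sub's
-- leftmost scan is this left-to-right scan trying the alternatives in pattern order.
def pvRestScan : List Char → List Char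
  | [] => []
  | c :: t =>
    if ("improvement".toList).isPrefixOf (c :: t) then
      "measurable improvement".toList ++ pvRestScan (t.drop 10)
    else if ("benefits".toList).isPrefixOf (c :: t) then
      "quantified financial benefits".toList ++ pvRestScan (t.drop 7)
    else if ("impact".toList).isPrefixOf (c :: t) then
      "measured financial impact".toList ++ pvRestScan (t.drop 5)
    else if ("results".toList).isPrefixOf (c :: t) then
      "quantitative results and metrics".toList ++ pvRestScan (t.drop 6)
    else c :: pvRestScan t
termination_by l => l.length
decreasing_by all_goals (simp; try omega)

def apply_analytical_quantitative_style_py_alt (content : String) : String :=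
  String.ofList (pvRestScan
    (PySem.Str.replace content "significant" "quantifiable and significant").toList)

-- ===== PRECONDITION & SPEC =====
def Spec_apply_analytical_quantitative_style_py (content : String) (out : String) : Prop := out = apply_analytical_quantitative_style_py_alt content
instance (content : String) (out : String) : Decidable (Spec_apply_analytical_quantitative_style_py content out) := by unfold Spec_apply_analytical_quantitative_style_py; infer_instance

-- ===== CLAIM (what is proved, stated in full; the proofs are below) =====
def Claim_equal_apply_analytical_quantitative_style_py : Prop := ∀ (content : String), Dom_apply_analytical_quantitative_style_py content → Spec_apply_analytical_quantitative_style_py content (apply_analytical_quantitative_style_py content)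

-- ===== LEMMAS AND PROOFS =====

-- clean functional model of Python's str.replace (leftmost, non-overlapping), for nonempty old
def pvRep (k v : List Char) : List Char → List Char
  | [] => []
  | c :: t =>
    if k.isPrefixOf (c :: t) then v ++ pvRep k v (t.drop (k.length - 1))
    else c :: pvRep k v t
termination_by l => l.length
decreasing_by all_goals (simp; try omega)

theorem pvRep_go_eq (old new : List Char) (h : old ≠ []) :
    ∀ fuel l acc, l.length ≤ fuel →
      PySem.Chars.replace.go old new fuel l acc = acc.reverse ++ pvRep old new l := by
  intro fuel
  induction fuel with
  | zero =>
    intro l acc hl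
    have : l = [] := by cases l <;> simp_all
    subst this
    simp [PySem.Chars.replace.go, pvRep]
  | succ m ih =>
    intro l acc hl
    cases l with
    | nil => simp [PySem.Chars.replace.go, pvRep]
    | cons c t =>
      simp only [PySem.Chars.replace.go]
      have hol : 1 ≤ old.length := by cases old <;> simp_all
      by_cases hp : old.isPrefixOf (c :: t)
      · rw [if_pos hp]
        obtain ⟨d, dt⟩ : ∃ d dt, old = d :: dt := by cases old <;> simp_all
        rw [ih _ _ (by simp at hl ⊢; omega)]
        simp only [pvRep, if_pos hp]
        obtain ⟨e, het⟩ := dt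
        simp [het, List.reverse_append]
      · rw [if_neg hp, ih _ _ (by simp at hl ⊢; omega)]
        simp [pvRep, hp]

theorem pvReplace_eq (s old new : List Char) (h : old ≠ []) :
    PySem.Chars.replace s old new = pvRep old new s := by
  unfold PySem.Chars.replace
  rw [if_neg (by simp [h])]
  simpa using pvRep_go_eq old new h s.length s [] le_rfl

theorem pvRep_push (k v a : List Char)
    (hC : ∀ a' ∈ a.tails, a' = [] ∨ (¬ k <+: a' ∧ ¬ a' <+: k)) :
    ∀ b, pvRep k v (a ++ b) = a ++ pvRep k v b := by
  induction a with
  | nil => intro b; simp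
  | cons c t ih =>
    intro b
    have hct := hC (c :: t) (by simp [List.mem_tails])
    have hct' : ¬ k <+: (c :: t) ∧ ¬ (c :: t) <+: k := by
      rcases hct with h1 | h2
      · exact absurd h1 (by simp)
      · exact h2
    have hnp : ¬ k.isPrefixOf ((c :: t) ++ b) := by
      rw [List.isPrefixOf_iff_prefix]
      intro hk
      by_cases hlen : k.length ≤ (c :: t).length
      · exact hct'.1 (List.prefix_of_prefix_length_le hk (List.prefix_append _ _) hlen)
      · exact hct'.2 (List.prefix_of_prefix_length_le (List.prefix_append _ _) hk (by omega))
    rw [List.cons_append] at hnp ⊢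
    rw [show pvRep k v (c :: (t ++ b)) = c :: pvRep k v (t ++ b) by
      simp only [pvRep]; rw [if_neg hnp]]
    rw [ih (fun a' ha' => hC a' ((List.mem_tails _ _).mpr
      (((List.mem_tails _ _).mp ha').trans (List.suffix_cons c t))))]
    simp

theorem pvRep_self (k v z : List Char) (h : k ≠ []) :
    pvRep k v (k ++ z) = v ++ pvRep k v z := by
  obtain ⟨c, t, rfl⟩ : ∃ c t, k = c :: t := by cases k <;> simp_all
  rw [List.cons_append]
  simp only [pvRep]
  rw [if_pos (by rw [List.isPrefixOf_iff_prefix]; exact List.prefix_append _ _)]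
  simp

theorem pvRep_noNew (k v k' : List Char) (hlen : k'.length < v.length)
    (hq : ∀ q ∈ k'.tails, q = [] ∨ ¬ q <+: v) :
    ∀ n s, s.length ≤ n → ∀ q ∈ k'.tails, q ≠ [] → q <+: pvRep k v s → q <+: s := by
  intro n
  induction n with
  | zero =>
    intro s hs q hqmem hqne hpre
    have : s = [] := by cases s <;> simp_all
    subst this
    simp [pvRep] at hpre
    simp_all
  | succ m ih =>
    intro s hs q hqmem hqne hpre
    cases s with
    | nil => simp [pvRep] at hpre; simp_all
    | cons c t =>
      by_cases hp : k.isPrefixOf (c :: t)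
      · simp only [pvRep, if_pos hp] at hpre
        have hql : q.length ≤ k'.length := List.IsSuffix.length_le (List.mem_tails _ _ |>.mp hqmem)
        have : q <+: v :=
          List.prefix_of_prefix_length_le hpre (List.prefix_append _ _) (by omega)
        rcases hq q hqmem with h1 | h2
        · exact absurd h1 hqne
        · exact absurd this h2
      · simp only [pvRep, hp, Bool.false_eq_true, if_false] at hpre
        cases q with
        | nil => exact absurd rfl hqne
        | cons d q' =>
          rw [List.cons_prefix_cons] at hpre
          obtain ⟨rfl, hq'⟩ := hpre
          cases hq'e : q' with
          | nil => subst hq'e; simp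
          | cons e q'' =>
            subst hq'e
            have hq'mem : (e :: q'') ∈ k'.tails := by
              rw [List.mem_tails] at hqmem ⊢
              exact (List.suffix_cons d _).trans hqmem
            have := ih t (by simp at hs; omega) (e :: q'') hq'mem (by simp) hq'
            exact List.cons_prefix_cons.mpr ⟨rfl, this⟩

theorem pvMain : ∀ n s, s.length ≤ n →
    pvRep "results".toList "quantitative results and metrics".toList
      (pvRep "impact".toList "measured financial impact".toList
        (pvRep "benefits".toList "quantified financial benefits".toList
          (pvRep "improvement".toList "measurable improvement".toList s)))
    = pvRestScan s := by
  intro n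
  induction n with
  | zero =>
    intro s hs
    have hnil : s = [] := by cases s <;> simp_all
    subst hnil
    simp [pvRep, pvRestScan]
  | succ m ih =>
    intro s hs
    cases s with
    | nil => simp [pvRep, pvRestScan]
    | cons c t =>
      by_cases h2 : ("improvement".toList).isPrefixOf (c :: t) = true
      · obtain ⟨t', ht'⟩ := List.isPrefixOf_iff_prefix.mp h2
        rw [show "improvement".toList ++ t' = 'i' :: ("mprovement".toList ++ t') from rfl] at ht'
        injection ht' with hc ht2
        subst hc; subst ht2
        have hlen : t'.length ≤ m := by
          simp only [List.length_cons, List.length_append] at hs; omega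
        simp only [pvRestScan]
        rw [if_pos h2]
        rw [show (("mprovement".toList ++ t').drop 10) = t' from by
          rw [show (10 : Nat) = ("mprovement".toList).length from rfl, List.drop_left]]
        rw [show ('i' :: ("mprovement".toList ++ t')) = "improvement".toList ++ t' from rfl]
        rw [pvRep_self "improvement".toList "measurable improvement".toList _ (by decide)]
        rw [pvRep_push "benefits".toList "quantified financial benefits".toList "measurable improvement".toList (by decide)]
        rw [pvRep_push "impact".toList "measured financial impact".toList "measurable improvement".toList (by decide)]
        rw [pvRep_push "results".toList "quantitative results and metrics".toList "measurable improvement".toList (by decide)]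
        rw [ih t' hlen]
      by_cases h3 : ("benefits".toList).isPrefixOf (c :: t) = true
      · obtain ⟨t', ht'⟩ := List.isPrefixOf_iff_prefix.mp h3
        rw [show "benefits".toList ++ t' = 'b' :: ("enefits".toList ++ t') from rfl] at ht'
        injection ht' with hc ht2
        subst hc; subst ht2
        have hlen : t'.length ≤ m := by
          simp only [List.length_cons, List.length_append] at hs; omega
        simp only [pvRestScan]
        rw [if_neg h2, if_pos h3]
        rw [show (("enefits".toList ++ t').drop 7) = t' from by
          rw [show (7 : Nat) = ("enefits".toList).length from rfl, List.drop_left]]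
        rw [show ('b' :: ("enefits".toList ++ t')) = "benefits".toList ++ t' from rfl]
        rw [pvRep_push "improvement".toList "measurable improvement".toList "benefits".toList (by decide)]
        rw [pvRep_self "benefits".toList "quantified financial benefits".toList _ (by decide)]
        rw [pvRep_push "impact".toList "measured financial impact".toList "quantified financial benefits".toList (by decide)]
        rw [pvRep_push "results".toList "quantitative results and metrics".toList "quantified financial benefits".toList (by decide)]
        rw [ih t' hlen]
      by_cases h4 : ("impact".toList).isPrefixOf (c :: t) = true
      · obtain ⟨t', ht'⟩ := List.isPrefixOf_iff_prefix.mp h4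
        rw [show "impact".toList ++ t' = 'i' :: ("mpact".toList ++ t') from rfl] at ht'
        injection ht' with hc ht2
        subst hc; subst ht2
        have hlen : t'.length ≤ m := by
          simp only [List.length_cons, List.length_append] at hs; omega
        simp only [pvRestScan]
        rw [if_neg h2, if_neg h3, if_pos h4]
        rw [show (("mpact".toList ++ t').drop 5) = t' from by
          rw [show (5 : Nat) = ("mpact".toList).length from rfl, List.drop_left]]
        rw [show ('i' :: ("mpact".toList ++ t')) = "impact".toList ++ t' from rfl]
        rw [pvRep_push "improvement".toList "measurable improvement".toList "impact".toList (by decide)]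
        rw [pvRep_push "benefits".toList "quantified financial benefits".toList "impact".toList (by decide)]
        rw [pvRep_self "impact".toList "measured financial impact".toList _ (by decide)]
        rw [pvRep_push "results".toList "quantitative results and metrics".toList "measured financial impact".toList (by decide)]
        rw [ih t' hlen]
      by_cases h5 : ("results".toList).isPrefixOf (c :: t) = true
      · obtain ⟨t', ht'⟩ := List.isPrefixOf_iff_prefix.mp h5
        rw [show "results".toList ++ t' = 'r' :: ("esults".toList ++ t') from rfl] at ht'
        injection ht' with hc ht2
        subst hc; subst ht2
        have hlen : t'.length ≤ m := by
          simp only [List.length_cons, List.length_append] at hs; omega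
        simp only [pvRestScan]
        rw [if_neg h2, if_neg h3, if_neg h4, if_pos h5]
        rw [show (("esults".toList ++ t').drop 6) = t' from by
          rw [show (6 : Nat) = ("esults".toList).length from rfl, List.drop_left]]
        rw [show ('r' :: ("esults".toList ++ t')) = "results".toList ++ t' from rfl]
        rw [pvRep_push "improvement".toList "measurable improvement".toList "results".toList (by decide)]
        rw [pvRep_push "benefits".toList "quantified financial benefits".toList "results".toList (by decide)]
        rw [pvRep_push "impact".toList "measured financial impact".toList "results".toList (by decide)]
        rw [pvRep_self "results".toList "quantitative results and metrics".toList _ (by decide)]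
        rw [ih t' hlen]
      · have hlen : t.length ≤ m := by simp only [List.length_cons] at hs; omega
        have e2 : pvRep "improvement".toList "measurable improvement".toList (c :: t) = c :: pvRep "improvement".toList "measurable improvement".toList t := by
          simp only [pvRep]; rw [if_neg h2]
        have n3 : ¬ ("benefits".toList).isPrefixOf (c :: pvRep "improvement".toList "measurable improvement".toList t) = true := by
          intro hb
          have hpre : "benefits".toList <+: (c :: pvRep "improvement".toList "measurable improvement".toList t) := List.isPrefixOf_iff_prefix.mp hb
          rw [← e2] at hpre
          exact h3 (List.isPrefixOf_iff_prefix.mpr (pvRep_noNew "improvement".toList "measurable improvement".toList "benefits".toList (by decide) (by decide) _ _ le_rfl _ ((List.mem_tails _ _).mpr (List.suffix_refl _)) (by decide) (hpre)))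
        have e3 : pvRep "benefits".toList "quantified financial benefits".toList (c :: pvRep "improvement".toList "measurable improvement".toList t) = c :: pvRep "benefits".toList "quantified financial benefits".toList (pvRep "improvement".toList "measurable improvement".toList t) := by
          simp only [pvRep]; rw [if_neg n3]
        have n4 : ¬ ("impact".toList).isPrefixOf (c :: pvRep "benefits".toList "quantified financial benefits".toList (pvRep "improvement".toList "measurable improvement".toList t)) = true := by
          intro hb
          have hpre : "impact".toList <+: (c :: pvRep "benefits".toList "quantified financial benefits".toList (pvRep "improvement".toList "measurable improvement".toList t)) := List.isPrefixOf_iff_prefix.mp hb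
          rw [← e3, ← e2] at hpre
          exact h4 (List.isPrefixOf_iff_prefix.mpr (pvRep_noNew "improvement".toList "measurable improvement".toList "impact".toList (by decide) (by decide) _ _ le_rfl _ ((List.mem_tails _ _).mpr (List.suffix_refl _)) (by decide) (pvRep_noNew "benefits".toList "quantified financial benefits".toList "impact".toList (by decide) (by decide) _ _ le_rfl _ ((List.mem_tails _ _).mpr (List.suffix_refl _)) (by decide) (hpre))))
        have e4 : pvRep "impact".toList "measured financial impact".toList (c :: pvRep "benefits".toList "quantified financial benefits".toList (pvRep "improvement".toList "measurable improvement".toList t)) = c :: pvRep "impact".toList "measured financial impact".toList (pvRep "benefits".toList "quantified financial benefits".toList (pvRep "improvement".toList "measurable improvement".toList t)) := by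
          simp only [pvRep]; rw [if_neg n4]
        have n5 : ¬ ("results".toList).isPrefixOf (c :: pvRep "impact".toList "measured financial impact".toList (pvRep "benefits".toList "quantified financial benefits".toList (pvRep "improvement".toList "measurable improvement".toList t))) = true := by
          intro hb
          have hpre : "results".toList <+: (c :: pvRep "impact".toList "measured financial impact".toList (pvRep "benefits".toList "quantified financial benefits".toList (pvRep "improvement".toList "measurable improvement".toList t))) := List.isPrefixOf_iff_prefix.mp hb
          rw [← e4, ← e3, ← e2] at hpre
          exact h5 (List.isPrefixOf_iff_prefix.mpr (pvRep_noNew "improvement".toList "measurable improvement".toList "results".toList (by decide) (by decide) _ _ le_rfl _ ((List.mem_tails _ _).mpr (List.suffix_refl _)) (by decide) (pvRep_noNew "benefits".toList "quantified financial benefits".toList "results".toList (by decide) (by decide) _ _ le_rfl _ ((List.mem_tails _ _).mpr (List.suffix_refl _)) (by decide) (pvRep_noNew "impact".toList "measured financial impact".toList "results".toList (by decide) (by decide) _ _ le_rfl _ ((List.mem_tails _ _).mpr (List.suffix_refl _)) (by decide) (hpre)))))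
        have e5 : pvRep "results".toList "quantitative results and metrics".toList (c :: pvRep "impact".toList "measured financial impact".toList (pvRep "benefits".toList "quantified financial benefits".toList (pvRep "improvement".toList "measurable improvement".toList t))) = c :: pvRep "results".toList "quantitative results and metrics".toList (pvRep "impact".toList "measured financial impact".toList (pvRep "benefits".toList "quantified financial benefits".toList (pvRep "improvement".toList "measurable improvement".toList t))) := by
          simp only [pvRep]; rw [if_neg n5]
        rw [e2, e3, e4, e5, ih t hlen]
        simp only [pvRestScan]
        rw [if_neg h2, if_neg h3, if_neg h4, if_neg h5]

-- ===== VERDICT (by name: the statement is the Claim_ definition above) =====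
theorem apply_analytical_quantitative_style_py_spec : Claim_equal_apply_analytical_quantitative_style_py := by
  intro content _
  unfold Spec_apply_analytical_quantitative_style_py
  apply String.toList_inj.mp
  simp only [apply_analytical_quantitative_style_py, apply_analytical_quantitative_style_py_alt,
    pvStylePairs, List.foldl, PySem.Str.toList_replace, String.toList_ofList]
  rw [pvReplace_eq _ _ _ (by decide), pvReplace_eq _ _ _ (by decide),
      pvReplace_eq _ _ _ (by decide), pvReplace_eq _ _ _ (by decide),
      pvReplace_eq _ _ _ (by decide)]
  exact pvMain _ _ le_rfl
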